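-- pv_equiv track=rewrite | github.com/tristanhussain/adk-samples-capstone | python/agents/genmedia-for-commerce/genmedia4commerce/workflows/video_vto/glasses/glasses_eval.py | is_video_valid
-- ===== SOURCE A (Python) =====
-- def is_people_ok(number):
--     """Returns True if person count is acceptable (0 or 1)."""
--     return number <= 1
--
-- def is_video_valid(people_counts):
--     """
--     Validates video based on people counts per frame.
--
--     A video is valid if there is no more than 1 person from a given point onwards.
--     Returns the index where the video becomes valid, or -1 if invalid.
--     """
--     if max(people_counts) <= 1:
--         return 0
--
--     index_found = -1
--     for idx_1, value in enumerate(people_counts[:-1]):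
--         is_ok_idx_1 = is_people_ok(value)
--         idx_2 = idx_1 + 1
--         is_ok_idx_2 = is_people_ok(people_counts[idx_2])
--         if not is_ok_idx_1 and is_ok_idx_2:
--             index_found = idx_2
--             break
--
--     if index_found != -1:
--         for elem in people_counts[index_found + 1 :]:
--             if not is_people_ok(elem):
--                 return -1
--     return index_found
-- ===== SOURCE B (Python) =====
-- def is_video_valid(people_counts):
--     """
--     Validates video based on people counts per frame.
--
--     A video is valid if there is no more than 1 person from a given point onwards.
--     Returns the index where the video becomes valid, or -1 if invalid.
--     """
--     if max(people_counts) <= 1: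
--         return 0
--     bad = [i for i, v in enumerate(people_counts) if v > 1]
--     first, last = bad[0], bad[-1]
--     if len(bad) == last - first + 1 and last + 1 < len(people_counts):
--         return last + 1
--     return -1
-- ===== Notes on version B (the rewrite author's own statement) =====
-- stated objective: simpler
-- what changed: A's forward scan over consecutive frame pairs looking for a bad-to-good transition followed by a tail re-check is replaced by building the list of bad-frame indices once and returning last_bad+1 exactly when the bad indices form one contiguous block with at least one frame after it.
-- outside the precondition, e.g. on is_video_valid([]): A raises ValueError, B raises ValueError
import Mathlib
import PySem

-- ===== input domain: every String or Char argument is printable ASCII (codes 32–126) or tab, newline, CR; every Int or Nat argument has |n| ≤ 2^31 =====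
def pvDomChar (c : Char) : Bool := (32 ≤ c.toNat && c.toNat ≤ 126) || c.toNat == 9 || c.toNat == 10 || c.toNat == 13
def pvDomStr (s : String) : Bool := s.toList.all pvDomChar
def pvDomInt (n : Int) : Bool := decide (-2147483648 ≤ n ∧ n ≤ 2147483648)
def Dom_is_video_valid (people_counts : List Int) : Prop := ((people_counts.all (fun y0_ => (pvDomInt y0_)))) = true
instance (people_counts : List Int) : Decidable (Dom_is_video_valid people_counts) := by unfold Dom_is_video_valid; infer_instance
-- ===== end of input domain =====

-- B replaces A's forward scan-for-a-bad→good-transition plus tail recheck by a single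
-- bad-index list: the answer is last_bad+1 iff the bad frames form one contiguous block
-- with at least one frame after it (objective: simpler).

-- ===== PORT A =====
def is_people_ok (number : Int) : Bool := number ≤ 1

-- the first for-loop of A (break = return of idx_2); iterates over enumerate(people_counts[:-1])
def pvFindLoop (people_counts : List Int) : List (Int × Int) → Int
  | [] => -1
  | (idx_1, value) :: rest =>
    let is_ok_idx_1 := is_people_ok value
    let idx_2 := idx_1 + 1
    let is_ok_idx_2 := is_people_ok (PySem.List.pyGetD people_counts idx_2 0)
    if !is_ok_idx_1 && is_ok_idx_2 then idx_2
    else pvFindLoop people_counts rest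

def is_video_valid (people_counts : List Int) : Int :=
  match PySem.List.max? people_counts id with
  | none => 0  -- Python raises ValueError here (max of empty list); excluded by Pre_
  | some m =>
    if m ≤ 1 then 0
    else
      let index_found := pvFindLoop people_counts
        (PySem.List.enumerate (PySem.List.slice people_counts none (some (-1))) 0)
      if index_found ≠ -1 then
        if (PySem.List.slice people_counts (some (index_found + 1)) none).any
            (fun elem => !is_people_ok elem) then -1
        else index_found
      else index_found

-- ===== PORT B =====
-- [i for i, v in enumerate(people_counts) if v > 1]
def pvBadIdx : List Int → Int → List Int
  | [], _ => []
  | v :: rest, i => if 1 < v then i :: pvBadIdx rest (i + 1) else pvBadIdx rest (i + 1)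

def is_video_valid_alt (people_counts : List Int) : Int :=
  match PySem.List.max? people_counts id with
  | none => -1  -- Python raises ValueError here (max of empty list); excluded by Pre_
  | some m =>
    if m ≤ 1 then 0
    else
      let bad := pvBadIdx people_counts 0
      let first := PySem.List.pyGetD bad 0 0
      let last := PySem.List.pyGetD bad (-1) 0
      if (bad.length : Int) = last - first + 1 ∧ last + 1 < (people_counts.length : Int)
      then last + 1 else -1

-- ===== PRECONDITION & SPEC =====
-- Pre_ excludes only the empty list, on which Python's max([]) raises ValueError.
def Pre_is_video_valid (people_counts : List Int) : Prop := people_counts ≠ []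
instance (people_counts : List Int) : Decidable (Pre_is_video_valid people_counts) := by unfold Pre_is_video_valid; infer_instance
def pvWitness_is_video_valid : List Int := [2, 1]

def Spec_is_video_valid (people_counts : List Int) (out : Int) : Prop := out = is_video_valid_alt people_counts
instance (people_counts : List Int) (out : Int) : Decidable (Spec_is_video_valid people_counts out) := by unfold Spec_is_video_valid; infer_instance

-- ===== CLAIM (what is proved, stated in full; the proofs are below) =====
def Claim_equal_is_video_valid : Prop := ∀ (people_counts : List Int), Dom_is_video_valid people_counts → Pre_is_video_valid people_counts → Spec_is_video_valid people_counts (is_video_valid people_counts)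

-- ===== LEMMAS AND PROOFS =====

lemma pv_max_cons_ne_none (t : List Int) : ∀ (x : Int), PySem.List.max? (x :: t) id ≠ none := by
  induction t with
  | nil => intro x; simp [PySem.List.max?]
  | cons y t ih =>
    intro x
    have h1 : PySem.List.max? (x :: y :: t) id = PySem.List.max? ((if x < y then y else x) :: t) id := by
      by_cases hxy : x < y <;> simp [PySem.List.max?, hxy]
    rw [h1]; exact ih _

lemma pv_max_ne_none (xs : List Int) (h : xs ≠ []) : PySem.List.max? xs id ≠ none := by
  cases xs with
  | nil => exact absurd rfl h
  | cons x t => exact pv_max_cons_ne_none t x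

-- proof-side view of A's first loop: scan consecutive pairs of the remaining list
def pvFP : List Int → Int → Int
  | [], _ => -1
  | [_], _ => -1
  | x :: y :: r, k => if 1 < x ∧ y ≤ 1 then k + 1 else pvFP (y :: r) (k + 1)

lemma pvGetD_drop_cons (xs : List Int) (j : Nat) (y : Int) (t : List Int)
    (h : xs.drop j = y :: t) : PySem.List.pyGetD xs (j : Int) 0 = y := by
  have hj : xs[j]? = some y := by
    have := List.getElem?_drop (xs := xs) (i := j) (j := 0)
    rw [h] at this
    simpa using this.symm
  rw [PySem.List.pyGetD_of_nonneg xs 0 (by positivity)]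
  simp [List.getD, hj]

lemma pvFindLoop_eq (ys : List Int) : ∀ (xs : List Int) (k : Nat), xs.drop k = ys →
    pvFindLoop xs (PySem.List.enumerate ys.dropLast (k : Int)) = pvFP ys (k : Int) := by
  induction ys with
  | nil => intro xs k h; simp [pvFindLoop, pvFP]
  | cons x ys ih =>
    intro xs k h
    cases ys with
    | nil => simp [pvFindLoop, pvFP]
    | cons y r =>
      have hd : (x :: y :: r).dropLast = x :: (y :: r).dropLast := rfl
      rw [hd, PySem.List.enumerate_cons]
      have hdrop : xs.drop (k + 1) = y :: r := by
        have h2 : (xs.drop k).drop 1 = xs.drop (k + 1) := by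
          rw [List.drop_drop]
        rw [h] at h2
        simpa using h2.symm
      have hy : PySem.List.pyGetD xs ((k : Int) + 1) 0 = y := by
        have := pvGetD_drop_cons xs (k+1) y r hdrop
        simpa [Int.natCast_add] using this
      simp only [pvFindLoop, hy]
      by_cases hc : 1 < x ∧ y ≤ 1
      · have : (!is_people_ok x && is_people_ok y) = true := by
          simp [is_people_ok]; omega
        simp [this, pvFP, hc]
      · have : (!is_people_ok x && is_people_ok y) = false := by
          simp [is_people_ok]; omega
        simp only [this, Bool.false_eq_true, if_false, pvFP, hc]
        have := ih xs (k+1) hdrop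
        simpa [Int.natCast_add] using this

lemma pvFP_good_prefix (p : List Int) : ∀ (r : List Int) (k : Int), (∀ v ∈ p, v ≤ 1) → r ≠ [] →
    pvFP (p ++ r) k = pvFP r (k + p.length) := by
  induction p with
  | nil => intro r k _ _; simp
  | cons a p ih =>
    intro r k hgood hr
    have ha : a ≤ 1 := hgood a (by simp)
    cases hpr : p ++ r with
    | nil => exact absurd (List.append_eq_nil_iff.mp hpr).2 hr
    | cons z w =>
      rw [List.cons_append, hpr, pvFP]
      have hna : ¬ (1 < a ∧ z ≤ 1) := by omega
      simp only [hna, if_false]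
      rw [← hpr, ih r (k+1) (fun v hv => hgood v (by simp [hv])) hr]
      congr 1
      simp
      ring

lemma pvFP_bad_to_end (b : List Int) : ∀ (k : Int), (∀ v ∈ b, 1 < v) → pvFP b k = -1 := by
  induction b with
  | nil => intro k _; simp [pvFP]
  | cons x b ih =>
    intro k hbad
    cases b with
    | nil => simp [pvFP]
    | cons y r =>
      have hy : 1 < y := hbad y (by simp)
      rw [pvFP]
      have : ¬ (1 < x ∧ y ≤ 1) := by omega
      simp only [this, if_false]
      exact ih (k+1) (fun v hv => hbad v (by simp at hv ⊢; tauto))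

lemma pvFP_bad_then_good (b : List Int) : ∀ (g : Int) (s' : List Int) (k : Int), b ≠ [] →
    (∀ v ∈ b, 1 < v) → g ≤ 1 → pvFP (b ++ g :: s') k = k + b.length := by
  induction b with
  | nil => intro g s' k hb _ _; exact absurd rfl hb
  | cons x b ih =>
    intro g s' k _ hbad hg
    have hx : 1 < x := hbad x (by simp)
    cases b with
    | nil => simp [pvFP, hx, hg]
    | cons z w =>
      have hz : 1 < z := hbad z (by simp)
      rw [List.cons_append, show (z :: w) ++ g :: s' = z :: (w ++ g :: s') from rfl, pvFP]
      have hnx : ¬ (1 < x ∧ z ≤ 1) := by omega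
      simp only [hnx, if_false]
      rw [show z :: (w ++ g :: s') = (z :: w) ++ g :: s' from rfl,
        ih g s' (k+1) (by simp) (fun v hv => hbad v (by simp at hv ⊢; tauto)) hg]
      simp
      ring

lemma pvBadIdx_append (u v : List Int) : ∀ (k : Int),
    pvBadIdx (u ++ v) k = pvBadIdx u k ++ pvBadIdx v (k + u.length) := by
  induction u with
  | nil => intro k; simp [pvBadIdx]
  | cons a u ih =>
    intro k
    have harith : k + 1 + (u.length : Int) = k + ((u.length : Int) + 1) := by ring
    by_cases ha : 1 < a <;>
      simp [pvBadIdx, ha, ih (k+1), harith]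

lemma pvBadIdx_eq_nil_iff (s : List Int) : ∀ (k : Int), pvBadIdx s k = [] ↔ ∀ v ∈ s, v ≤ 1 := by
  induction s with
  | nil => intro k; simp [pvBadIdx]
  | cons a s ih =>
    intro k
    by_cases ha : 1 < a
    · simp only [pvBadIdx, ha, if_true]
      constructor
      · intro hc; exact absurd hc (by simp)
      · intro hall; exact absurd (hall a (by simp)) (by omega)
    · simp only [pvBadIdx, ha, if_false]
      rw [ih (k+1)]
      constructor
      · intro hall v hv
        rcases List.mem_cons.mp hv with h1 | h2
        · omega
        · exact hall v h2
      · intro hall v hv; exact hall v (by simp [hv])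

lemma pvBadIdx_all_bad (b : List Int) : ∀ (k : Int), (∀ v ∈ b, 1 < v) →
    pvBadIdx b k = PySem.List.pyRange k (k + b.length) := by
  induction b with
  | nil => intro k _; simp [pvBadIdx, PySem.List.pyRange_one_eq_nil]
  | cons a b ih =>
    intro k hbad
    have ha : 1 < a := hbad a (by simp)
    rw [pvBadIdx]
    simp only [ha, if_true]
    rw [ih (k+1) (fun v hv => hbad v (by simp [hv])),
      PySem.List.pyRange_one_cons (a := k) (b := k + ((a :: b).length : Int)) (by simp)]
    congr 2
    simp
    ring

lemma pvBadIdx_last_ge (s : List Int) : ∀ (k : Int), pvBadIdx s k ≠ [] →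
    k + (pvBadIdx s k).length ≤ (pvBadIdx s k).getLastD 0 + 1 := by
  induction s with
  | nil => intro k h; exact absurd rfl h
  | cons a s ih =>
    intro k h
    by_cases ha : 1 < a
    · rw [pvBadIdx] at h ⊢
      simp only [ha, if_true] at h ⊢
      cases hrest : pvBadIdx s (k+1) with
      | nil => simp
      | cons b t =>
        have hthis := ih (k+1) (by rw [hrest]; simp)
        rw [hrest] at hthis
        have hirr : (b :: t).getLastD k = (b :: t).getLastD 0 := by
          simp [List.getLastD]
        rw [List.getLastD_cons, hirr]
        simp at hthis ⊢
        omega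
    · rw [pvBadIdx] at h ⊢
      simp only [ha, if_false] at h ⊢
      exact le_trans (by omega) (ih (k+1) h)

lemma pvGetD_neg_one (l : List Int) (d : Int) (h : l ≠ []) :
    PySem.List.pyGetD l (-1) d = l.getLastD d := by
  simp [PySem.List.pyGetD, PySem.List.pyGet?, PySem.List.pyIdx?]
  cases l with
  | nil => exact absurd rfl h
  | cons a t =>
    rw [List.getLast?_eq_getElem?]
    rw [List.getElem?_eq_getElem (by simp)]
    simp
    rfl

lemma pvGetD_zero_cons (l : List Int) (a : Int) : PySem.List.pyGetD (a :: l) 0 0 = a := by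
  rw [PySem.List.pyGetD_of_nonneg _ _ (by omega)]; simp

lemma pvGetLastD_append (l1 : List Int) (b : Int) (t : List Int) :
    (l1 ++ b :: t).getLastD 0 = (b :: t).getLastD 0 := by
  rw [List.getLastD_eq_getLast?, List.getLastD_eq_getLast?, List.getLast?_append]
  cases h : (b :: t).getLast? with
  | none => simp at h
  | some v => simp

lemma pvRange_getLastD (a b : Int) (h : a < b) :
    (PySem.List.pyRange a b).getLastD 0 = b - 1 := by
  have heq : PySem.List.pyRange a b = PySem.List.pyRange a (b-1) ++ [b-1] := by
    have := PySem.List.pyRange_one_succ_right (a := a) (b := b-1) (by omega)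
    simpa using this
  rw [heq, List.getLastD_concat]

-- the core: after the max-guard has failed (some frame has > 1 person), the two programs agree
lemma pv_core (xs : List Int) (x0 : Int) (hx0 : x0 ∈ xs) (hx1 : 1 < x0) :
    (let index_found := pvFindLoop xs
        (PySem.List.enumerate (PySem.List.slice xs none (some (-1))) 0);
     if index_found ≠ -1 then
       if (PySem.List.slice xs (some (index_found + 1)) none).any
           (fun elem => !is_people_ok elem) then -1
       else index_found
     else index_found) =
    (let bad := pvBadIdx xs 0;
     let first := PySem.List.pyGetD bad 0 0;
     let last := PySem.List.pyGetD bad (-1) 0;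
     if (bad.length : Int) = last - first + 1 ∧ last + 1 < (xs.length : Int)
     then last + 1 else -1) := by
  -- canonical decomposition xs = P ++ (h0 :: b') ++ s, P good, h0 :: b' the first maximal bad run
  have hPgood : ∀ v ∈ xs.takeWhile (fun v => decide (v ≤ 1)), v ≤ 1 :=
    fun v hv => by simpa using List.mem_takeWhile_imp hv
  have hrne : xs.dropWhile (fun v => decide (v ≤ 1)) ≠ [] := by
    intro hnil
    have := List.dropWhile_eq_nil_iff.mp hnil x0 hx0
    simp at this; omega
  have hhead := List.head_dropWhile_not (fun v => decide (v ≤ 1)) hrne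
  have hsplit1 := List.takeWhile_append_dropWhile
    (p := fun v => decide (v ≤ 1)) (l := xs)
  cases hR : xs.dropWhile (fun v => decide (v ≤ 1)) with
  | nil => exact absurd hR hrne
  | cons h0 t0 =>
  simp only [hR, List.head_cons] at hhead
  have hh0 : 1 < h0 := by simpa using hhead
  rw [hR] at hsplit1
  have hb'bad : ∀ v ∈ t0.takeWhile (fun v => decide (1 < v)), 1 < v :=
    fun v hv => by simpa using List.mem_takeWhile_imp hv
  have hsplit2 := List.takeWhile_append_dropWhile
    (p := fun v => decide (1 < v)) (l := t0)
  -- abbreviations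
  have hbbad : ∀ v ∈ h0 :: t0.takeWhile (fun v => decide (1 < v)), 1 < v := by
    intro v hv
    rcases List.mem_cons.mp hv with h1 | h2
    · omega
    · exact hb'bad v h2
  have hxs : xs = xs.takeWhile (fun v => decide (v ≤ 1)) ++
      ((h0 :: t0.takeWhile (fun v => decide (1 < v))) ++ t0.dropWhile (fun v => decide (1 < v))) := by
    conv_lhs => rw [← hsplit1]
    simp [hsplit2]
  -- A's first loop computes pvFP xs 0
  have hA0 : PySem.List.slice xs none (some (-1)) = xs.dropLast := by
    simp [PySem.List.slice, List.dropLast_eq_take]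
  have hA1 : pvFindLoop xs (PySem.List.enumerate xs.dropLast ((0 : Nat) : Int)) = pvFP xs ((0 : Nat) : Int) :=
    pvFindLoop_eq xs xs 0 (by simp)
  simp only [Nat.cast_zero] at hA1
  set P := xs.takeWhile (fun v => decide (v ≤ 1)) with hPdef
  set b := h0 :: t0.takeWhile (fun v => decide (1 < v)) with hbdef
  set s := t0.dropWhile (fun v => decide (1 < v)) with hsdef
  cases hs : s with
  | nil =>
    -- no frame after the (single or final) bad run: both return -1
    rw [hs] at hxs
    simp only [List.append_nil] at hxs
    have hfp : pvFP xs 0 = -1 := by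
      rw [hxs, pvFP_good_prefix P b 0 hPgood (by simp [hbdef]),
        pvFP_bad_to_end b _ hbbad]
    have hbadidx : pvBadIdx xs 0 = PySem.List.pyRange (P.length : Int) ((P.length : Int) + b.length) := by
      rw [hxs, pvBadIdx_append, (pvBadIdx_eq_nil_iff P 0).mpr hPgood,
        pvBadIdx_all_bad b _ hbbad]
      simp
    have hblt : (P.length : Int) < (P.length : Int) + b.length := by simp [hbdef]
    have hcons := PySem.List.pyRange_one_cons (a := (P.length : Int)) (b := (P.length : Int) + b.length) hblt
    have hfirst : PySem.List.pyGetD (pvBadIdx xs 0) 0 0 = (P.length : Int) := by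
      rw [hbadidx, hcons, pvGetD_zero_cons]
    have hlast : PySem.List.pyGetD (pvBadIdx xs 0) (-1) 0 = (P.length : Int) + b.length - 1 := by
      rw [hbadidx, pvGetD_neg_one _ _ (by rw [hcons]; simp), pvRange_getLastD _ _ hblt]
    have hlen : ((pvBadIdx xs 0).length : Int) = (b.length : Int) := by
      rw [hbadidx, PySem.List.length_pyRange_one]
      omega
    have hn : (xs.length : Int) = (P.length : Int) + b.length := by
      rw [hxs]; push_cast [List.length_append]; ring
    have hncond : ¬ (((pvBadIdx xs 0).length : Int) =
        PySem.List.pyGetD (pvBadIdx xs 0) (-1) 0 - PySem.List.pyGetD (pvBadIdx xs 0) 0 0 + 1 ∧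
        PySem.List.pyGetD (pvBadIdx xs 0) (-1) 0 + 1 < (xs.length : Int)) := by
      rw [hfirst, hlast, hlen, hn]
      omega
    simp only [hA0, hA1, hfp, hncond, if_false]
    simp
  | cons g s' =>
    -- there is a frame after the first bad run; its head g is good
    have hdw : t0.dropWhile (fun v => decide (1 < v)) = g :: s' := by
      rw [← hsdef, hs]
    have hg : g ≤ 1 := by
      have hh := List.head_dropWhile_not (fun v => decide (1 < v)) (l := t0) (by rw [hdw]; simp)
      simp only [hdw, List.head_cons] at hh
      simpa using hh
    rw [hs] at hxs
    have hfp : pvFP xs 0 = (P.length : Int) + b.length := by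
      rw [hxs, pvFP_good_prefix P _ 0 hPgood (by simp [hbdef]),
        pvFP_bad_then_good b g s' _ (by simp [hbdef]) hbbad hg]
      ring
    have hidx_ne : ((P.length : Int) + b.length) ≠ -1 := by omega
    have htail : PySem.List.slice xs (some ((P.length : Int) + b.length + 1)) none = s' := by
      rw [PySem.List.slice_from _ (by positivity)]
      have h1 : ((P.length : Int) + b.length + 1).toNat = (P ++ b ++ [g]).length := by
        simp; omega
      rw [h1, hxs, show P ++ (b ++ g :: s') = (P ++ b ++ [g]) ++ s' by simp, List.drop_left]
    have hgstep : pvBadIdx (g :: s') ((P.length : Int) + b.length) =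
        pvBadIdx s' ((P.length : Int) + b.length + 1) := by
      rw [pvBadIdx]
      simp [show ¬ (1 < g) by omega]
    have hbadidx : pvBadIdx xs 0 =
        PySem.List.pyRange (P.length : Int) ((P.length : Int) + b.length) ++
          pvBadIdx s' ((P.length : Int) + b.length + 1) := by
      rw [hxs, pvBadIdx_append, (pvBadIdx_eq_nil_iff P 0).mpr hPgood,
        pvBadIdx_append b (g :: s'), pvBadIdx_all_bad b _ hbbad]
      simp only [List.nil_append, zero_add]
      rw [hgstep]
    have hblt : (P.length : Int) < (P.length : Int) + b.length := by simp [hbdef]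
    have hcons := PySem.List.pyRange_one_cons (a := (P.length : Int)) (b := (P.length : Int) + b.length) hblt
    have hn : (xs.length : Int) = (P.length : Int) + b.length + 1 + s'.length := by
      rw [hxs]; push_cast [List.length_append, List.length_cons]; ring
    cases hbs : pvBadIdx s' ((P.length : Int) + b.length + 1) with
    | nil =>
      -- everything after the bad run is good: both return |P| + |b|
      have hs'good : ∀ v ∈ s', v ≤ 1 := (pvBadIdx_eq_nil_iff s' _).mp hbs
      have hany : s'.any (fun elem => !is_people_ok elem) = false := by
        simp [is_people_ok]
        intro v hv
        exact hs'good v hv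
      rw [hbs] at hbadidx
      simp only [List.append_nil] at hbadidx
      have hfirst : PySem.List.pyGetD (pvBadIdx xs 0) 0 0 = (P.length : Int) := by
        rw [hbadidx, hcons, pvGetD_zero_cons]
      have hlast : PySem.List.pyGetD (pvBadIdx xs 0) (-1) 0 = (P.length : Int) + b.length - 1 := by
        rw [hbadidx, pvGetD_neg_one _ _ (by rw [hcons]; simp), pvRange_getLastD _ _ hblt]
      have hlen : ((pvBadIdx xs 0).length : Int) = (b.length : Int) := by
        rw [hbadidx, PySem.List.length_pyRange_one]
        omega
      have hcond : (((pvBadIdx xs 0).length : Int) =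
          PySem.List.pyGetD (pvBadIdx xs 0) (-1) 0 - PySem.List.pyGetD (pvBadIdx xs 0) 0 0 + 1 ∧
          PySem.List.pyGetD (pvBadIdx xs 0) (-1) 0 + 1 < (xs.length : Int)) := by
        rw [hfirst, hlast, hlen, hn]
        constructor <;> omega
      simp only [hA0, hA1, hfp, hidx_ne, if_true, htail, hany, if_false,
        ne_eq, not_false_iff, Bool.false_eq_true]
      rw [if_pos hcond, hlast]
      ring
    | cons b1 t1 =>
      -- a later frame is bad again: both return -1
      have hs'bad : ∃ v ∈ s', 1 < v := by
        by_contra hno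
        push Not at hno
        have : pvBadIdx s' ((P.length : Int) + b.length + 1) = [] :=
          (pvBadIdx_eq_nil_iff s' _).mpr (fun v hv => by have := hno v hv; omega)
        rw [hbs] at this
        exact absurd this (by simp)
      have hany : s'.any (fun elem => !is_people_ok elem) = true := by
        obtain ⟨v, hv, hv1⟩ := hs'bad
        simp [is_people_ok]
        exact ⟨v, hv, by omega⟩
      rw [hbs] at hbadidx
      have hfirst : PySem.List.pyGetD (pvBadIdx xs 0) 0 0 = (P.length : Int) := by
        rw [hbadidx, hcons, List.cons_append, pvGetD_zero_cons]
      have hlastge := pvBadIdx_last_ge s' ((P.length : Int) + b.length + 1) (by rw [hbs]; simp)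
      rw [hbs] at hlastge
      have hlast : PySem.List.pyGetD (pvBadIdx xs 0) (-1) 0 = (b1 :: t1).getLastD 0 := by
        rw [hbadidx, pvGetD_neg_one _ _ (by simp), pvGetLastD_append]
      have hlen : ((pvBadIdx xs 0).length : Int) = (b.length : Int) + (t1.length + 1) := by
        rw [hbadidx, List.length_append, PySem.List.length_pyRange_one]
        simp only [List.length_cons]
        push_cast
        omega
      have hncond : ¬ (((pvBadIdx xs 0).length : Int) =
          PySem.List.pyGetD (pvBadIdx xs 0) (-1) 0 - PySem.List.pyGetD (pvBadIdx xs 0) 0 0 + 1 ∧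
          PySem.List.pyGetD (pvBadIdx xs 0) (-1) 0 + 1 < (xs.length : Int)) := by
      -- length of bad list is |b| + |badS| but the span last - first + 1 is at least one larger
        rw [hfirst, hlast, hlen]
        simp only [List.length_cons] at hlastge
        push_cast at hlastge ⊢
        omega
      simp only [hA0, hA1, hfp, hidx_ne, if_true, htail, hany, if_true, hncond, if_false,
        ne_eq, not_false_iff]

-- ===== VERDICT (by name: the statement is the Claim_ definition above) =====
theorem is_video_valid_spec : Claim_equal_is_video_valid := by
  intro xs _ hpre
  unfold Spec_is_video_valid is_video_valid is_video_valid_alt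
  cases h : PySem.List.max? xs id with
  | none => exact absurd h (pv_max_ne_none xs hpre)
  | some m =>
    by_cases hm : m ≤ 1
    · simp [hm]
    · simp only [hm, if_false]
      exact pv_core xs m (PySem.List.max?_mem h) (by omega)
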